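-- pv_equiv track=rewrite | github.com/galaxyLiu/File_processing_tools | asp_scanzip/aspscan_zip_package/common/handler_data.py | get_name_method
-- ===== SOURCE A (Python) =====
-- def get_name_method(list_data):
--     data = []
--     for i in range(len(list_data)):
--         if i % 2 == 1:
--             data.append(list_data[i])
--             yield data
--             data = []
--         else:
--             data.append(list_data[i])
-- ===== SOURCE B (Python) =====
-- def get_name_method(list_data):
--     it = iter(list_data)
--     for pair in zip(it, it):
--         yield list(pair)
-- ===== Notes on version B (the rewrite author's own statement) =====
-- stated objective: idiomatic
-- what changed: Replaces the index loop with a parity test and a reset accumulator by the standard zip(it, it) pairing idiom that consumes the iterator two elements at a time.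
import Mathlib
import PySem

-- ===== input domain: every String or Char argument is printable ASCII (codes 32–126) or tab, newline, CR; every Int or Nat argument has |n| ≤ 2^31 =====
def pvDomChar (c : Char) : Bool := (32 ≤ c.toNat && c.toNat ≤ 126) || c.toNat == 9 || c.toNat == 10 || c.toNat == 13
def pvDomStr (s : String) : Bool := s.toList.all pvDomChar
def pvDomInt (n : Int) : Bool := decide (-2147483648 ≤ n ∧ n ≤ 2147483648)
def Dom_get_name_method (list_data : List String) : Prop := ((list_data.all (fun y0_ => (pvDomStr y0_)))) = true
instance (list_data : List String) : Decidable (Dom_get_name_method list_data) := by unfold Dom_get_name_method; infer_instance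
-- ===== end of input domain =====

-- B keeps A's generator semantics (the list of yielded values); header note: A mutates nothing.

-- ===== PORT A =====
-- 'for i in range(len(list_data)): … list_data[i] …' ported as a fold over enumerate
-- (same index sequence, list_data[i] is the paired element); state = (data, yielded list).
def get_name_method (list_data : List String) : List (List String) :=
  ((PySem.List.enumerate list_data 0).foldl
    (fun (st : List String × List (List String)) p =>
      if PySem.Int.mod p.1 2 == 1 then ([], st.2 ++ [st.1 ++ [p.2]])
      else (st.1 ++ [p.2], st.2))
    ([], [])).2

-- ===== PORT B =====
-- zip(it, it) over one iterator consumes two elements per step: structural two-at-a-time recursion.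
def get_name_method_alt : List String → List (List String)
  | a :: b :: rest => [a, b] :: get_name_method_alt rest
  | _ => []

-- ===== PRECONDITION & SPEC =====
def Spec_get_name_method (list_data : List String) (out : List (List String)) : Prop := out = get_name_method_alt list_data
instance (list_data : List String) (out : List (List String)) : Decidable (Spec_get_name_method list_data out) := by unfold Spec_get_name_method; infer_instance

-- ===== CLAIM (what is proved, stated in full; the proofs are below) =====
def Claim_equal_get_name_method : Prop := ∀ (list_data : List String), Dom_get_name_method list_data → Spec_get_name_method list_data (get_name_method list_data)

-- ===== LEMMAS AND PROOFS =====
-- A's loop, started at an even index with an empty pending 'data', appends exactly B's pairs.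
theorem get_name_method_loop (xs : List String) :
    ∀ (s : Int) (acc : List (List String)), s % 2 = 0 →
    ((PySem.List.enumerate xs s).foldl
      (fun (st : List String × List (List String)) p =>
        if PySem.Int.mod p.1 2 == 1 then ([], st.2 ++ [st.1 ++ [p.2]])
        else (st.1 ++ [p.2], st.2))
      ([], acc)).2 = acc ++ get_name_method_alt xs := by
  induction xs using get_name_method_alt.induct with
  | case1 a b rest ih =>
    intro s acc hs
    have h0 : ¬ s % 2 = 1 := by omega
    have h1 : (s + 1) % 2 = 1 := by omega
    have h2 : (s + 1 + 1) % 2 = 0 := by omega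
    have hrec := ih (s + 1 + 1) (acc ++ [[a, b]]) h2
    simp at hrec
    simp [PySem.List.enumerate_cons, h0, h1, get_name_method_alt, hrec]
  | case2 xs hne =>
    intro s acc hs
    have h0 : ¬ s % 2 = 1 := by omega
    match xs, hne with
    | [], _ => simp [PySem.List.enumerate_nil, get_name_method_alt]
    | [a], _ =>
      simp [PySem.List.enumerate_cons, PySem.List.enumerate_nil, h0, get_name_method_alt]
    | a :: b :: rest, h => exact (h a b rest rfl).elim

-- ===== VERDICT (by name: the statement is the Claim_ definition above) =====
theorem get_name_method_spec : Claim_equal_get_name_method := by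
  intro xs _
  unfold Spec_get_name_method get_name_method
  simpa using get_name_method_loop xs 0 [] (by decide)
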